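-- pv_equiv track=rewrite | github.com/Carlital/Proyecto_Aplicaciones | Código Fuente/google_sheets_import/models/employee_import.py | _clean_facultad_name
-- ===== SOURCE A (Python) =====
-- def _clean_facultad_name(raw):
--     txt = (raw or '').split(';')[0].strip()
--     txt_lower = txt.lower()
--
--     prefixes = [
--         'facultad de ',
--         'facultad en ',
--         'facultad ',
--     ]
--
--     for p in prefixes:
--         if txt_lower.startswith(p):
--             txt = txt[len(p):].strip()
--             break
--
--     return txt
-- ===== SOURCE B (Python) =====
-- def _clean_facultad_name(raw):
--     txt = (raw or '').split(';')[0].strip()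
--     if txt.lower().startswith('facultad '):
--         rest = txt[9:]
--         if rest.lower().startswith('de ') or rest.lower().startswith('en '):
--             rest = rest[3:]
--         return rest.strip()
--     return txt
-- ===== Notes on version B (the rewrite author's own statement) =====
-- stated objective: simpler
-- what changed: Replaces the prefix-list loop (startswith/break over three overlapping prefixes) with a factored two-stage strip: remove the mandatory 'facultad ' prefix, then optionally the 'de '/'en ' connector, with an early return when no prefix matches.
import Mathlib
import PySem

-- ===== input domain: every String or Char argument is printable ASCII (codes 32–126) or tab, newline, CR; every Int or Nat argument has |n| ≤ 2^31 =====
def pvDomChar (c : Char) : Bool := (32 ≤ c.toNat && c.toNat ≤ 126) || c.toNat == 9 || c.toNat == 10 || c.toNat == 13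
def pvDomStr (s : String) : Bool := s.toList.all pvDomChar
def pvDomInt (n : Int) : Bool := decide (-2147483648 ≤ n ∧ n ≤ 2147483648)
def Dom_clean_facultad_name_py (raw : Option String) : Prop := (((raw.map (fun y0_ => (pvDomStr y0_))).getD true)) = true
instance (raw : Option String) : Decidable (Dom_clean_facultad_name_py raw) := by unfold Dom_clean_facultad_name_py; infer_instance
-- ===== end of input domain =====

-- B replaces A's prefix-list loop with a factored two-stage strip (mandatory 'facultad ', then
-- optional 'de '/'en ' connector, early return when nothing matches); objective: simpler.

-- ===== PORT A =====
def cfnPrefixes : List String := ["facultad de ", "facultad en ", "facultad "]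

-- the `for p in prefixes: … break` loop, as structural recursion over the prefix list
def cfnLoopA (txt txt_lower : String) : List String → String
  | [] => txt
  | p :: ps =>
    if PySem.Str.startswith txt_lower p then
      PySem.Str.strip (PySem.Str.slice txt (some (PySem.Str.len p)) none)
    else cfnLoopA txt txt_lower ps

def clean_facultad_name_py (raw : Option String) : String :=
  -- (raw or '').split(';')[0]: split with a nonempty separator is never empty, so [0] is headD ""
  let txt := PySem.Str.strip (((PySem.Str.split? (raw.getD "") ";").getD []).headD "")
  let txt_lower := PySem.Str.lower txt
  cfnLoopA txt txt_lower cfnPrefixes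

-- ===== PORT B =====
def clean_facultad_name_py_alt (raw : Option String) : String :=
  let txt := PySem.Str.strip (((PySem.Str.split? (raw.getD "") ";").getD []).headD "")
  if PySem.Str.startswith (PySem.Str.lower txt) "facultad " then
    let rest := PySem.Str.slice txt (some 9) none
    let rest :=
      if PySem.Str.startswith (PySem.Str.lower rest) "de " ||
         PySem.Str.startswith (PySem.Str.lower rest) "en " then
        PySem.Str.slice rest (some 3) none
      else rest
    PySem.Str.strip rest
  else txt

-- ===== PRECONDITION & SPEC =====
def Spec_clean_facultad_name_py (raw : Option String) (out : String) : Prop := out = clean_facultad_name_py_alt raw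
instance (raw : Option String) (out : String) : Decidable (Spec_clean_facultad_name_py raw out) := by unfold Spec_clean_facultad_name_py; infer_instance

-- ===== CLAIM (what is proved, stated in full; the proofs are below) =====
def Claim_equal_clean_facultad_name_py : Prop := ∀ (raw : Option String), Dom_clean_facultad_name_py raw → Spec_clean_facultad_name_py raw (clean_facultad_name_py raw)

-- ===== LEMMAS AND PROOFS =====

-- a compound prefix is a prefix iff its head part is and its tail part prefixes the rest
theorem cfn_prefix_append_iff {α : Type} (p q s : List α) :
    p ++ q <+: s ↔ p <+: s ∧ q <+: s.drop p.length := by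
  constructor
  · rintro ⟨t, rfl⟩
    refine ⟨⟨q ++ t, by simp⟩, ?_⟩
    simp
  · rintro ⟨hp, hq⟩
    have ht : s.take p.length = p := (List.prefix_iff_eq_take.mp hp).symm
    have hs : s = p ++ s.drop p.length := by
      conv_lhs => rw [← List.take_append_drop p.length s, ht]
    rw [hs]
    exact (List.prefix_append_right_inj p).mpr hq

theorem cfn_main (txt : String) :
    cfnLoopA txt (PySem.Str.lower txt) cfnPrefixes =
      (if PySem.Str.startswith (PySem.Str.lower txt) "facultad " then
        let rest := PySem.Str.slice txt (some 9) none
        let rest :=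
          if PySem.Str.startswith (PySem.Str.lower rest) "de " ||
             PySem.Str.startswith (PySem.Str.lower rest) "en " then
            PySem.Str.slice rest (some 3) none
          else rest
        PySem.Str.strip rest
      else txt) := by
  have hsw : ∀ (s p : String), PySem.Str.startswith s p = (p.toList.isPrefixOf s.toList) := by
    intro s p; rfl
  have hsl9 : (PySem.Str.slice txt (some 9) none).toList = txt.toList.drop 9 := by
    simp [PySem.Str.slice]
    rw [show ((9 : Int)) = ((9 : Nat) : Int) by norm_num, PySem.List.slice_from_natCast]
  have hsl3 : ∀ (s : String), (PySem.Str.slice s (some 3) none).toList = s.toList.drop 3 := by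
    intro s
    simp [PySem.Str.slice]
    rw [show ((3 : Int)) = ((3 : Nat) : Int) by norm_num, PySem.List.slice_from_natCast]
  have hsl12 : (PySem.Str.slice txt (some 12) none).toList = txt.toList.drop 12 := by
    simp [PySem.Str.slice]
    rw [show ((12 : Int)) = ((12 : Nat) : Int) by norm_num, PySem.List.slice_from_natCast]
  -- lowered drop-9 rest vs drop 9 of the lowered text
  have hld : (PySem.Str.lower (PySem.Str.slice txt (some 9) none)).toList
      = (PySem.Str.lower txt).toList.drop 9 := by
    simp [PySem.Str.lower, PySem.Chars.lower, hsl9, List.map_drop]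
  -- factor the compound prefixes
  have hde : PySem.Str.startswith (PySem.Str.lower txt) "facultad de "
      = (PySem.Str.startswith (PySem.Str.lower txt) "facultad "
         && PySem.Str.startswith (PySem.Str.lower (PySem.Str.slice txt (some 9) none)) "de ") := by
    simp only [hsw, hld]
    rw [show ("facultad de ").toList = ("facultad ").toList ++ ("de ").toList by decide]
    rw [Bool.eq_iff_iff]
    simp only [Bool.and_eq_true, List.isPrefixOf_iff_prefix]
    have h := cfn_prefix_append_iff ("facultad ").toList ("de ").toList ((PySem.Str.lower txt).toList)
    simpa [show ("facultad ").toList.length = 9 from by decide] using h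
  have hen : PySem.Str.startswith (PySem.Str.lower txt) "facultad en "
      = (PySem.Str.startswith (PySem.Str.lower txt) "facultad "
         && PySem.Str.startswith (PySem.Str.lower (PySem.Str.slice txt (some 9) none)) "en ") := by
    simp only [hsw, hld]
    rw [show ("facultad en ").toList = ("facultad ").toList ++ ("en ").toList by decide]
    rw [Bool.eq_iff_iff]
    simp only [Bool.and_eq_true, List.isPrefixOf_iff_prefix]
    have h := cfn_prefix_append_iff ("facultad ").toList ("en ").toList ((PySem.Str.lower txt).toList)
    simpa [show ("facultad ").toList.length = 9 from by decide] using h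
  -- drop 12 = drop 3 ∘ drop 9 at the string level
  have hdrop : PySem.Str.slice (PySem.Str.slice txt (some 9) none) (some 3) none
      = PySem.Str.slice txt (some 12) none := by
    apply String.toList_injective
    rw [hsl3, hsl9, hsl12, List.drop_drop]
  have l12 : PySem.Str.len "facultad de " = 12 := by decide
  have l12' : PySem.Str.len "facultad en " = 12 := by decide
  have l9 : PySem.Str.len "facultad " = 9 := by decide
  simp only [cfnLoopA, cfnPrefixes, hde, hen, l12, l12', l9]
  by_cases h1 : PySem.Str.startswith (PySem.Str.lower txt) "facultad " = true
  · by_cases h2 : PySem.Str.startswith (PySem.Str.lower (PySem.Str.slice txt (some 9) none)) "de " = true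
    · simp only [h1, h2, hdrop, Bool.true_and, Bool.true_or]
      simp
    · by_cases h3 : PySem.Str.startswith (PySem.Str.lower (PySem.Str.slice txt (some 9) none)) "en " = true
      · simp only [eq_false_of_ne_true h2, h1, h3, hdrop, Bool.true_and, Bool.and_false,
          Bool.or_true]
        simp
      · simp only [eq_false_of_ne_true h2, eq_false_of_ne_true h3, h1,
          Bool.and_false, Bool.or_self]
        simp
  · simp only [eq_false_of_ne_true h1, Bool.false_and]
    simp

-- ===== VERDICT (by name: the statement is the Claim_ definition above) =====
theorem clean_facultad_name_py_spec : Claim_equal_clean_facultad_name_py := by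
  intro raw _
  unfold Spec_clean_facultad_name_py clean_facultad_name_py clean_facultad_name_py_alt
  exact cfn_main _
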